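-- pv_equiv track=rewrite | github.com/2JooYeon/Algorithm_Study | InKyeong/17.py | solution
-- ===== SOURCE A (Python) =====
-- import math
--
-- def solution(answers):
--     answer = []
--     num = len(answers)
--     one = 0
--     two = 0
--     three = 0
--     first = [1, 2, 3, 4, 5] * math.ceil(num/5)
--     second = [2, 1, 2, 3, 2, 4, 2, 5] * math.ceil(num/8)
--     third = [3, 3, 1, 1, 2, 2, 4, 4, 5, 5] * math.ceil(num/10)
--     for i in range(num) :
--         if first[i] == answers[i] : one += 1
--         if second[i] == answers[i] : two += 1
--         if third[i] == answers[i] : three += 1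
--     maxnum = max(one, two, three)
--     if maxnum == one : answer.append(1)
--     if maxnum == two : answer.append(2)
--     if maxnum == three : answer.append(3)
--     return answer
-- ===== SOURCE B (Python) =====
-- def solution(answers):
--     # Group answers once by (position mod 40, value) -- 40 = lcm of the three
--     # pattern periods -- then each supervisor's score is 40 table lookups.
--     cnt = {}
--     for i, a in enumerate(answers):
--         key = (i % 40, a)
--         cnt[key] = cnt.get(key, 0) + 1
--     patterns = [[1, 2, 3, 4, 5],
--                 [2, 1, 2, 3, 2, 4, 2, 5],
--                 [3, 3, 1, 1, 2, 2, 4, 4, 5, 5]]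
--     scores = [sum(cnt.get((r, p[r % len(p)]), 0) for r in range(40))
--               for p in patterns]
--     best = max(scores)
--     return [k for k, s in enumerate(scores, 1) if s == best]
-- ===== Notes on version B (the rewrite author's own statement) =====
-- stated objective: alternative
-- what changed: B replaces A's three materialized full-length answer sheets and fused three-counter comparison loop by a grouping pass: one dict counting occurrences of (position mod 40, answer) -- 40 being the lcm of the three pattern periods -- after which each supervisor's score is a sum of 40 table lookups against its short base pattern, independent of the input length.
import Mathlib
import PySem

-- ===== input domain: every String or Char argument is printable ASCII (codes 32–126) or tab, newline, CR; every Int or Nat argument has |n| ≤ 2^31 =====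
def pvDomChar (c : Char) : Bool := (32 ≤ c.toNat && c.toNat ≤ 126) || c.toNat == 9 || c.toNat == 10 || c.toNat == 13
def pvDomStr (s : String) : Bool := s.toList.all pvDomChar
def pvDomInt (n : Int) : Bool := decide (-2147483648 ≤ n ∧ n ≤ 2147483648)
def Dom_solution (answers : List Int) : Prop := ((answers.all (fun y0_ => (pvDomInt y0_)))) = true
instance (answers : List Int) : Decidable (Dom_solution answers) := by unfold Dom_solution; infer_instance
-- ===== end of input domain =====

-- B replaces A's three materialized answer sheets and fused three-counter loop by one grouping
-- dict keyed by (position mod 40, answer); each score is then 40 table lookups (objective: alternative).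

-- ===== PORT A =====
-- the loop body of A's single for-loop (three independent `if`s incrementing one/two/three)
def solutionStep (first second third answers : List Int) (s : Int × Int × Int) (i : Int) : Int × Int × Int :=
  (if PySem.List.pyGetD first i 0 == PySem.List.pyGetD answers i 0 then s.1 + 1 else s.1,
   if PySem.List.pyGetD second i 0 == PySem.List.pyGetD answers i 0 then s.2.1 + 1 else s.2.1,
   if PySem.List.pyGetD third i 0 == PySem.List.pyGetD answers i 0 then s.2.2 + 1 else s.2.2)

def solution (answers : List Int) : List Int :=
  let num : Int := PySem.List.len answers
  -- math.ceil(num/5) etc. is exact here (num = len(answers) ≥ 0, far below float precision);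
  -- ported as the integer ceiling division -((-num) // d)
  let first := PySem.List.pyRepeat [(1:Int), 2, 3, 4, 5] (-(PySem.Int.floordiv (-num) 5))
  let second := PySem.List.pyRepeat [(2:Int), 1, 2, 3, 2, 4, 2, 5] (-(PySem.Int.floordiv (-num) 8))
  let third := PySem.List.pyRepeat [(3:Int), 3, 1, 1, 2, 2, 4, 4, 5, 5] (-(PySem.Int.floordiv (-num) 10))
  let s := (PySem.List.pyRange 0 num 1).foldl (solutionStep first second third answers) (0, 0, 0)
  let maxnum := max s.1 (max s.2.1 s.2.2)
  let answer : List Int := if maxnum == s.1 then [1] else []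
  let answer := if maxnum == s.2.1 then answer ++ [2] else answer
  let answer := if maxnum == s.2.2 then answer ++ [3] else answer
  answer

-- ===== PORT B =====
-- for i, a in enumerate(answers): key = (i % 40, a); cnt[key] = cnt.get(key, 0) + 1
def solutionCnt (answers : List Int) : PySem.Dict (Int × Int) Int :=
  (PySem.List.enumerate answers).foldl
    (fun d ia =>
      d.insert (PySem.Int.mod ia.1 40, ia.2)
        (d.getD (PySem.Int.mod ia.1 40, ia.2) 0 + 1))
    PySem.Dict.empty

-- sum(cnt.get((r, p[r % len(p)]), 0) for r in range(40))
def solutionLookup (cnt : PySem.Dict (Int × Int) Int) (p : List Int) : Int :=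
  (PySem.List.pyRange 0 40 1).foldl
    (fun acc r =>
      acc + cnt.getD (r, PySem.List.pyGetD p (PySem.Int.mod r (PySem.List.len p)) 0) 0) 0

def solution_alt (answers : List Int) : List Int :=
  let cnt := solutionCnt answers
  let patterns : List (List Int) :=
    [[1, 2, 3, 4, 5], [2, 1, 2, 3, 2, 4, 2, 5], [3, 3, 1, 1, 2, 2, 4, 4, 5, 5]]
  let scores := patterns.map (fun p => solutionLookup cnt p)
  let best := (PySem.List.max? scores (fun y => y)).getD 0   -- scores is always nonempty, so max(scores) never raises
  (PySem.List.enumerate scores 1).filterMap (fun ks => if ks.2 == best then some ks.1 else none)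

-- ===== PRECONDITION & SPEC =====
def Spec_solution (answers : List Int) (out : List Int) : Prop := out = solution_alt answers
instance (answers : List Int) (out : List Int) : Decidable (Spec_solution answers out) := by unfold Spec_solution; infer_instance

-- ===== CLAIM (what is proved, stated in full; the proofs are below) =====
def Claim_equal_solution : Prop := ∀ (answers : List Int), Dom_solution answers → Spec_solution answers (solution answers)

-- ===== LEMMAS AND PROOFS =====

-- the common yardstick both sides are reduced to: does position i match pattern p cyclically?
def matchB (answers p : List Int) (i : Int) : Bool :=
  PySem.List.pyGetD answers i 0 == PySem.List.pyGetD p (PySem.Int.mod i (PySem.List.len p)) 0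

-- indexing into a repeated pattern is modular indexing into the pattern
lemma getD_pyRepeat (p : List Int) (q : Int) (i : Nat) (hi : i < q.toNat * p.length) :
    (PySem.List.pyRepeat p q).getD i 0 = p.getD (i % p.length) 0 := by
  unfold PySem.List.pyRepeat
  generalize q.toNat = k at hi
  induction k generalizing i with
  | zero => simp at hi
  | succ k ih =>
    rw [Nat.succ_mul] at hi
    rw [List.replicate_succ, List.flatten_cons]
    by_cases h : i < p.length
    · rw [List.getD_append _ _ _ _ h, Nat.mod_eq_of_lt h]
    · have hlen : 0 < p.length := by
        rcases Nat.eq_zero_or_pos p.length with h0 | h0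
        · rw [h0] at hi; simp at hi
        · exact h0
      rw [List.getD_append_right _ _ _ _ (by omega)]
      have hmod : i % p.length = (i - p.length) % p.length := by
        conv_lhs => rw [show i = p.length + (i - p.length) by omega]
        rw [Nat.add_mod_left]
      rw [hmod]
      exact ih (i - p.length) (by omega)

-- the fused triple-counter fold splits into three independent counts
lemma foldl_triple (first second third answers : List Int) (l : List Int) (s : Int × Int × Int) :
    l.foldl (solutionStep first second third answers) s
    = (s.1 + l.countP (fun i => PySem.List.pyGetD first i 0 == PySem.List.pyGetD answers i 0),
       s.2.1 + l.countP (fun i => PySem.List.pyGetD second i 0 == PySem.List.pyGetD answers i 0),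
       s.2.2 + l.countP (fun i => PySem.List.pyGetD third i 0 == PySem.List.pyGetD answers i 0)) := by
  induction l generalizing s with
  | nil => simp
  | cons x t ih =>
    simp only [List.foldl_cons, ih, List.countP_cons, solutionStep]
    refine Prod.ext ?_ (Prod.ext ?_ ?_) <;> simp <;> split_ifs <;> omega

-- A's count against a repeated full-length sheet is the cyclic-match count
lemma repeat_count_eq (answers p : List Int) (q : Int) (hp : p ≠ [])
    (hq : (answers.length : Int) ≤ q * p.length) :
    (PySem.List.pyRange 0 ((answers.length : Int)) 1).countP
        (fun i => PySem.List.pyGetD (PySem.List.pyRepeat p q) i 0 == PySem.List.pyGetD answers i 0)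
    = (PySem.List.pyRange 0 ((answers.length : Int)) 1).countP (matchB answers p) := by
  apply List.countP_congr
  intro x hx
  rw [PySem.List.mem_pyRange_one] at hx
  obtain ⟨k, rfl⟩ : ∃ k : Nat, x = (k : Int) := ⟨x.toNat, by omega⟩
  have hk : k < answers.length := by omega
  have hkrep : k < q.toNat * p.length := by
    have hlen : 0 < p.length := List.length_pos_of_ne_nil hp
    have hq0 : 0 ≤ q := by nlinarith [hq, Int.natCast_nonneg answers.length]
    have : (k : Int) < q * p.length := by omega
    have h2 : (k : Int) < (q.toNat : Int) * (p.length : Int) := by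
      rwa [Int.toNat_of_nonneg hq0]
    exact_mod_cast h2
  simp only [matchB, PySem.List.len_eq, PySem.Int.mod_natCast, PySem.List.pyGetD_natCast]
  rw [getD_pyRepeat p q k hkrep]
  simp only [beq_iff_eq]
  exact eq_comm

-- summing, over a nodup index list R covering every key's first component, the multiplicity of
-- (r, f r) in l counts exactly the pairs of l whose second component is f of their first
lemma sum_count_group (R : List Int) (hnd : R.Nodup) (l : List (Int × Int)) (f : Int → Int)
    (hmem : ∀ kv ∈ l, kv.1 ∈ R) :
    (R.map (fun r => (l.count (r, f r) : Int))).sum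
    = (l.countP (fun kv => kv.2 == f kv.1) : Int) := by
  induction l with
  | nil => simp
  | cons x t ih =>
    have hmt : ∀ kv ∈ t, kv.1 ∈ R := fun kv hk => hmem kv (List.mem_cons_of_mem _ hk)
    have hx : x.1 ∈ R := hmem x (List.mem_cons_self)
    simp only [List.count_cons, List.countP_cons]
    have hsplit : (R.map (fun r => (t.count (r, f r) + if x == (r, f r) then 1 else 0 : Int))).sum
        = (R.map (fun r => (t.count (r, f r) : Int))).sum
          + (R.map (fun r => (if x == (r, f r) then 1 else 0 : Int))).sum := by
      rw [← List.sum_map_add]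
    have hone : (R.map (fun r => (if x == (r, f r) then 1 else 0 : Int))).sum
        = (if x.2 == f x.1 then 1 else 0 : Int) := by
      by_cases hfx : x.2 = f x.1
      · have : (R.map (fun r => (if x == (r, f r) then 1 else 0 : Int))).sum
            = (R.countP (fun r => x == (r, f r)) : Int) := by
          rw [PySem.List.sum_map_ite_one_zero]
        rw [this]
        have hc : R.countP (fun r => x == (r, f r)) = R.count x.1 := by
          rw [List.count]
          apply List.countP_congr
          intro r _
          by_cases hr : r = x.1
          · subst hr; simp [hfx.symm]
          · simp [Prod.ext_iff, hr, Ne.symm hr]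
        rw [hc, List.count_eq_one_of_mem hnd hx]
        simp [hfx]
      · have hz : R.countP (fun r => x == (r, f r)) = 0 := by
          rw [List.countP_eq_zero]
          intro r _
          simp only [beq_iff_eq, Prod.ext_iff]
          rintro ⟨rfl, h2⟩
          exact hfx h2
        rw [PySem.List.sum_map_ite_one_zero, hz]
        simp [hfx]
    push_cast
    rw [show (fun r => (↑(t.count (r, f r)) + if x == (r, f r) then 1 else 0 : Int))
          = (fun r => ((t.count (r, f r) : Int) + if x == (r, f r) then 1 else 0)) from rfl] at *
    calc (R.map (fun r => ((t.count (r, f r) : Int) + if x == (r, f r) then 1 else 0))).sum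
        = (R.map (fun r => (t.count (r, f r) : Int))).sum
          + (R.map (fun r => (if x == (r, f r) then 1 else 0 : Int))).sum := hsplit
      _ = (t.countP (fun kv => kv.2 == f kv.1) : Int) + (if x.2 == f x.1 then 1 else 0 : Int) := by
          rw [ih hmt, hone]
      _ = _ := by split_ifs <;> ring

-- B's 40 table lookups against the grouping dict give the cyclic-match count
lemma lookup_eq_count (answers p : List Int) (hdvd : p.length ∣ 40) :
    solutionLookup (solutionCnt answers) p
    = ((PySem.List.pyRange 0 ((answers.length : Int)) 1).countP (matchB answers p) : Int) := by
  have hcnt : solutionCnt answers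
      = PySem.Dict.counter ((PySem.List.enumerate answers).map
          (fun ia => (PySem.Int.mod ia.1 40, ia.2))) := by
    unfold solutionCnt
    rw [← PySem.Dict.foldl_insert_getD_add_one_eq_counter]
    exact (List.foldl_map (f := fun ia : Int × Int => (PySem.Int.mod ia.1 40, ia.2))
      (g := fun (d : PySem.Dict (Int × Int) Int) k => d.insert k (d.getD k 0 + 1))
      (l := PySem.List.enumerate answers) (init := PySem.Dict.empty)).symm
  unfold solutionLookup
  rw [hcnt, PySem.List.foldl_add, zero_add]
  simp only [PySem.Dict.getD_counter]
  set keys := (PySem.List.enumerate answers).map (fun ia => (PySem.Int.mod ia.1 40, ia.2)) with hkeys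
  have hkeys2 : keys = (PySem.List.pyRange 0 ((answers.length : Int)) 1).map
      (fun j => (PySem.Int.mod j 40, PySem.List.pyGetD answers j 0)) := by
    rw [hkeys, PySem.List.enumerate_eq_map_pyRange answers 0, List.map_map]
    simp [PySem.List.len_eq, Function.comp]
  have hmem : ∀ kv ∈ keys, kv.1 ∈ PySem.List.pyRange 0 40 1 := by
    intro kv hkv
    rw [hkeys2, List.mem_map] at hkv
    obtain ⟨j, hj, rfl⟩ := hkv
    rw [PySem.List.mem_pyRange_one]
    exact ⟨PySem.Int.mod_nonneg j (by norm_num), PySem.Int.mod_lt j (by norm_num)⟩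
  rw [sum_count_group (PySem.List.pyRange 0 40 1) (PySem.List.nodup_pyRange_one 0 40) keys
      (fun r => PySem.List.pyGetD p (PySem.Int.mod r (PySem.List.len p)) 0) hmem]
  congr 1
  rw [hkeys2, List.countP_map]
  apply List.countP_congr
  intro x hx
  rw [PySem.List.mem_pyRange_one] at hx
  obtain ⟨k, rfl⟩ : ∃ k : Nat, x = (k : Int) := ⟨x.toNat, by omega⟩
  simp only [Function.comp, matchB, PySem.List.len_eq, PySem.Int.mod_natCast]
  have h40 : PySem.Int.mod (k : Int) 40 = ((k % 40 : Nat) : Int) := by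
    rw [show ((40 : Int)) = ((40 : Nat) : Int) from rfl, PySem.Int.mod_natCast]
  rw [h40, PySem.Int.mod_natCast, Nat.mod_mod_of_dvd k hdvd]

-- ceiling division bound: num ≤ ceil(num/d) * d
lemma ceil_bound (n : Int) (d : Int) (hd : 0 < d) : n ≤ -(PySem.Int.floordiv (-n) d) * d := by
  have h := (PySem.Int.neg_floordiv_neg_eq_iff_of_pos (a := n) (b := d)
    (q := -(PySem.Int.floordiv (-n) d)) hd).mp rfl
  exact h.2

-- the winner-selection step agrees for any three scores
lemma final_eq (a b c : Int) :
    (let maxnum := max a (max b c);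
     let ans : List Int := if maxnum == a then [1] else [];
     let ans := if maxnum == b then ans ++ [2] else ans;
     if maxnum == c then ans ++ [3] else ans)
    = (PySem.List.enumerate [a, b, c] 1).filterMap
        (fun ks => if ks.2 == (PySem.List.max? [a, b, c] (fun y => y)).getD 0 then some ks.1 else none) := by
  rw [PySem.List.max?_id_cons]
  simp only [List.foldl_cons, List.foldl_nil, Option.getD_some,
    PySem.List.enumerate_cons, PySem.List.enumerate_nil,
    List.filterMap_cons, List.filterMap_nil, beq_iff_eq, ← max_assoc]
  split_ifs <;> first | rfl | tauto

-- ===== VERDICT (by name: the statement is the Claim_ definition above) =====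
theorem solution_spec : Claim_equal_solution := by
  intro answers _
  unfold Spec_solution solution solution_alt
  simp only [PySem.List.len_eq, List.map_cons, List.map_nil, foldl_triple, zero_add]
  rw [repeat_count_eq answers [1,2,3,4,5] (-(PySem.Int.floordiv (-((answers.length : Int))) 5)) (by simp)
        (by simpa using ceil_bound (answers.length : Int) 5 (by norm_num)),
      repeat_count_eq answers [2,1,2,3,2,4,2,5] (-(PySem.Int.floordiv (-((answers.length : Int))) 8)) (by simp)
        (by simpa using ceil_bound (answers.length : Int) 8 (by norm_num)),
      repeat_count_eq answers [3,3,1,1,2,2,4,4,5,5] (-(PySem.Int.floordiv (-((answers.length : Int))) 10)) (by simp)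
        (by simpa using ceil_bound (answers.length : Int) 10 (by norm_num)),
      ← lookup_eq_count answers [1,2,3,4,5] (by norm_num),
      ← lookup_eq_count answers [2,1,2,3,2,4,2,5] (by norm_num),
      ← lookup_eq_count answers [3,3,1,1,2,2,4,4,5,5] (by norm_num)]
  exact final_eq (solutionLookup (solutionCnt answers) [1,2,3,4,5])
    (solutionLookup (solutionCnt answers) [2,1,2,3,2,4,2,5])
    (solutionLookup (solutionCnt answers) [3,3,1,1,2,2,4,4,5,5])
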